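-- pv_equiv track=rewrite | github.com/ieliashberg/ECS189G_Self_Consistency | pipeline_cache.py | _majority_vote_parsed
-- ===== SOURCE A (Python) =====
-- from collections import Counter
-- from typing import Dict, Iterable, List, Optional
--
-- def _majority_vote_parsed(parsed_answers: Iterable[Optional[str]]) -> Optional[str]:
--     valid = [answer for answer in parsed_answers if answer is not None]
--     if not valid:
--         return None
--
--     counts = Counter(valid)
--     top_count = max(counts.values())
--     for answer in valid:
--         if counts[answer] == top_count:
--             return answer
--     return None
-- ===== SOURCE B (Python) =====
-- def _majority_vote_parsed(parsed_answers):
--     best = None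
--     best_count = 0
--     counts = {}
--     for a in reversed(list(parsed_answers)):
--         if a is None:
--             continue
--         c = counts.get(a, 0) + 1
--         counts[a] = c
--         if c >= best_count:
--             best, best_count = a, c
--     return best
-- ===== Notes on version B (the rewrite author's own statement) =====
-- stated objective: alternative
-- what changed: Replaces A's three staged passes (materialise valid list, Counter+max(), re-scan for the first top-count answer) with a single backward pass that counts and selects simultaneously: scanning in reverse with a >= update makes the running count at each element equal its suffix count, so the last update is at the earliest first occurrence of a maximal-count answer and the tie-break falls out of the traversal direction with no max() and no re-scan.
import Mathlib
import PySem

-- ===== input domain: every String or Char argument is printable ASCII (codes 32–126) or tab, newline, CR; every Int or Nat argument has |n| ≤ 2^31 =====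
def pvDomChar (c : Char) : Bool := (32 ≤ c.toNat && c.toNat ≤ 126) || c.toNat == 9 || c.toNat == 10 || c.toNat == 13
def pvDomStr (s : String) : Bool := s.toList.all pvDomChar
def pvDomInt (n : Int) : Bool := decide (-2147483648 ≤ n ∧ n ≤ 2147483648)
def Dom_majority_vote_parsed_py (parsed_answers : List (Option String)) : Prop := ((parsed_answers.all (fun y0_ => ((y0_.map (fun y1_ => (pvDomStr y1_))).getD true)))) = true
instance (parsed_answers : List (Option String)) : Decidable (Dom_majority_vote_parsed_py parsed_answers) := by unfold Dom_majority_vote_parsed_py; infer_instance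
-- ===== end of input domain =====

-- B replaces A's staged passes (valid list, Counter, max(), re-scan) with ONE backward pass that
-- counts and selects simultaneously; the >= update in reverse order realises A's earliest-most-common tie-break.
-- ===== PORT A =====
-- valid = [answer for answer in parsed_answers if answer is not None]; Counter; max of counts.values; first valid answer with top count
def majority_vote_parsed_py (parsed_answers : List (Option String)) : Option String :=
  let valid := parsed_answers.filterMap (fun a => a)
  if valid = [] then none
  else
    let counts := PySem.Dict.counter valid
    match (PySem.Dict.values counts).max? with
    | none => none   -- unreachable: valid is nonempty, Python's max never raises here
    | some top => valid.find? (fun a => counts.getD a 0 == top)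

-- ===== PORT B =====
-- loop body of Source B: skip None; bump the suffix count of a; take a as candidate when its count reaches the running best
def bStep (st : Option String × Int × PySem.Dict String Int) (a : Option String) :
    Option String × Int × PySem.Dict String Int :=
  match a with
  | none => st
  | some s =>
    let c := st.2.2.getD s 0 + 1
    let d := st.2.2.insert s c
    if st.2.1 ≤ c then (some s, c, d) else (st.1, st.2.1, d)

-- one reverse pass: for a in reversed(list(parsed_answers)): …; return best
def majority_vote_parsed_py_alt (parsed_answers : List (Option String)) : Option String :=
  (parsed_answers.reverse.foldl bStep
    (none, 0, (PySem.Dict.empty : PySem.Dict String Int))).1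

-- ===== PRECONDITION & SPEC =====
def Spec_majority_vote_parsed_py (parsed_answers : List (Option String)) (out : Option String) : Prop := out = majority_vote_parsed_py_alt parsed_answers
instance (parsed_answers : List (Option String)) (out : Option String) : Decidable (Spec_majority_vote_parsed_py parsed_answers out) := by unfold Spec_majority_vote_parsed_py; infer_instance

-- ===== CLAIM =====
def Claim_equal_majority_vote_parsed_py : Prop := ∀ (parsed_answers : List (Option String)), Dom_majority_vote_parsed_py parsed_answers → Spec_majority_vote_parsed_py parsed_answers (majority_vote_parsed_py parsed_answers)

-- ===== LEMMAS AND PROOFS =====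

-- count of s in t, as an Int
def pvCnt (t : List String) (s : String) : Int := (t.count s : Int)

-- the maximal count occurring in t (0 for the empty list)
def pvMx (t : List String) : Int := (t.map (fun a => pvCnt t a)).foldl max 0

-- the step of B restricted to present (non-None) answers
def sStep (st : Option String × Int × PySem.Dict String Int) (s : String) :
    Option String × Int × PySem.Dict String Int :=
  let c := st.2.2.getD s 0 + 1
  let d := st.2.2.insert s c
  if st.2.1 ≤ c then (some s, c, d) else (st.1, st.2.1, d)

theorem bStep_filterMap (l : List (Option String)) :
    ∀ st, l.foldl bStep st = (l.filterMap (fun a => a)).foldl sStep st := by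
  induction l with
  | nil => intro st; simp
  | cons a t ih => intro st; cases a <;> simp [bStep, sStep, ih]

theorem pv_foldl_max_le_of (ys : List Int) :
    ∀ b m : Int, b ≤ m → (∀ y ∈ ys, y ≤ m) → ys.foldl max b ≤ m := by
  induction ys with
  | nil => simp
  | cons y ys ih =>
    intro b m hb h
    simp only [List.foldl_cons]
    exact ih _ m (max_le hb (h y (by simp))) (fun z hz => h z (by simp [hz]))

theorem pvMx_nonneg (t : List String) : 0 ≤ pvMx t :=
  (PySem.List.le_foldl_max (t.map (fun a => pvCnt t a)) 0).1

theorem le_pvMx (t : List String) (a : String) (h : a ∈ t) : pvCnt t a ≤ pvMx t :=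
  (PySem.List.le_foldl_max (t.map (fun a => pvCnt t a)) 0).2 _ (List.mem_map_of_mem h)

theorem pvMx_le (t : List String) (b : Int) (hb : 0 ≤ b)
    (h : ∀ a ∈ t, pvCnt t a ≤ b) : pvMx t ≤ b := by
  apply pv_foldl_max_le_of _ _ _ hb
  simp only [List.mem_map]
  rintro y ⟨a, ha, rfl⟩; exact h a ha

theorem pvMx_attained (t : List String) (hpos : 0 < pvMx t) :
    ∃ a ∈ t, pvCnt t a = pvMx t := by
  rcases PySem.List.foldl_max_mem (t.map (fun a => pvCnt t a)) 0 with h | h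
  · exfalso; rw [pvMx, h] at hpos; exact lt_irrefl 0 hpos
  · rcases List.mem_map.mp h with ⟨a, ha, hc⟩
    exact ⟨a, ha, hc⟩

theorem pvCnt_cons (h : String) (r : List String) (s : String) :
    pvCnt (h :: r) s = if s = h then pvCnt r s + 1 else pvCnt r s := by
  simp only [pvCnt, List.count_cons]
  by_cases hs : s = h
  · simp [hs]
  · simp [hs]; exact fun hh => hs hh.symm

theorem find?_congr_mem {α : Type} (l : List α) (p q : α → Bool)
    (h : ∀ a ∈ l, p a = q a) : l.find? p = l.find? q := by
  induction l with
  | nil => rfl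
  | cons a t ih =>
    have ha := h a (by simp)
    simp only [List.find?, ha]
    cases q a
    · exact ih (fun b hb => h b (by simp [hb]))
    · rfl

-- the invariant of B's reverse fold: after consuming t.reverse the dict holds the counts of t,
-- the running best count is pvMx t, and the candidate is A's selection on t
theorem bInv (t : List String) :
    (∀ s, (t.reverse.foldl sStep (none, 0, (PySem.Dict.empty : PySem.Dict String Int))).2.2.getD s 0 = pvCnt t s) ∧
    (t.reverse.foldl sStep (none, 0, (PySem.Dict.empty : PySem.Dict String Int))).2.1 = pvMx t ∧
    (t.reverse.foldl sStep (none, 0, (PySem.Dict.empty : PySem.Dict String Int))).1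
      = t.find? (fun a => pvCnt t a == pvMx t) := by
  induction t with
  | nil =>
    refine ⟨fun s => ?_, rfl, rfl⟩
    simp [pvCnt, PySem.Dict.getD, PySem.Dict.get?, PySem.Dict.empty]
  | cons h r ih =>
    obtain ⟨ihd, ihm, ihc⟩ := ih
    have hfold : (h :: r).reverse.foldl sStep (none, 0, (PySem.Dict.empty : PySem.Dict String Int))
        = sStep (r.reverse.foldl sStep (none, 0, (PySem.Dict.empty : PySem.Dict String Int))) h := by
      simp [List.foldl_append]
    set st := r.reverse.foldl sStep (none, 0, (PySem.Dict.empty : PySem.Dict String Int)) with hst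
    have hc : st.2.2.getD h 0 + 1 = pvCnt (h :: r) h := by
      rw [ihd h, pvCnt_cons]; simp
    have hc2 : pvCnt (h :: r) h = pvCnt r h + 1 := by rw [pvCnt_cons]; simp
    have hcnt_pos : (0:Int) < pvCnt (h :: r) h := by
      have : (0:Int) ≤ pvCnt r h := by simp [pvCnt]
      omega
    have hdict : ∀ s, ((st.2.2.insert h (st.2.2.getD h 0 + 1)).getD s 0) = pvCnt (h :: r) s := by
      intro s
      rw [PySem.Dict.getD_insert, pvCnt_cons]
      by_cases hs : s = h
      · simp [hs, ihd h]
      · simp [hs, ihd s]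
    by_cases hle : st.2.1 ≤ st.2.2.getD h 0 + 1
    · -- candidate updated to h
      have hstep : sStep st h = (some h, st.2.2.getD h 0 + 1, st.2.2.insert h (st.2.2.getD h 0 + 1)) := by
        simp [sStep, hle]
      have hler : pvMx r ≤ pvCnt (h :: r) h := by rw [← hc, ← ihm]; exact hle
      have hmx : pvMx (h :: r) = pvCnt (h :: r) h := by
        apply le_antisymm
        · apply pvMx_le _ _ (by omega)
          intro a ha
          rw [pvCnt_cons]
          by_cases hah : a = h
          · subst hah; rw [if_pos rfl]; omega
          · rw [if_neg hah]
            have ha2 : a ∈ r := by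
              rcases List.mem_cons.mp ha with rfl | h2
              · exact absurd rfl hah
              · exact h2
            have := le_pvMx r a ha2
            omega
        · exact le_pvMx _ _ (by simp)
      constructor
      · intro s; rw [hfold, hstep]; exact hdict s
      constructor
      · rw [hfold, hstep]; simp [hmx, hc]
      · rw [hfold, hstep]
        simp only [List.find?]
        have : (pvCnt (h :: r) h == pvMx (h :: r)) = true := by simp [hmx]
        rw [this]
    · -- candidate kept
      have hstep : sStep st h = (st.1, st.2.1, st.2.2.insert h (st.2.2.getD h 0 + 1)) := by
        simp [sStep, hle]
      have hlt : pvCnt (h :: r) h < pvMx r := by rw [← hc, ← ihm]; omega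
      have hmx : pvMx (h :: r) = pvMx r := by
        apply le_antisymm
        · apply pvMx_le _ _ (pvMx_nonneg r)
          intro a ha
          rcases List.mem_cons.mp ha with rfl | ha2
          · omega
          · rw [pvCnt_cons]
            by_cases hah : a = h
            · subst hah; rw [if_pos rfl]
              have := hlt; rw [pvCnt_cons, if_pos rfl] at this; omega
            · rw [if_neg hah]; exact le_pvMx r a ha2
        · have hpos : 0 < pvMx r := by omega
          obtain ⟨a, ha, hca⟩ := pvMx_attained r hpos
          have hah : a ≠ h := by
            intro hh; subst hh
            have := hlt; rw [pvCnt_cons, if_pos rfl] at this; omega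
          have : pvCnt (h :: r) a = pvMx r := by rw [pvCnt_cons, if_neg hah, hca]
          rw [← this]; exact le_pvMx _ _ (by simp [ha])
      constructor
      · intro s; rw [hfold, hstep]; exact hdict s
      constructor
      · rw [hfold, hstep, ihm, hmx]
      · rw [hfold, hstep, ihc]
        simp only [List.find?]
        have hph : (pvCnt (h :: r) h == pvMx (h :: r)) = false := by
          simp [hmx]; omega
        rw [hph]
        apply find?_congr_mem
        intro a ha
        rw [pvCnt_cons, hmx]
        by_cases hah : a = h
        · subst hah
          have : (pvCnt r a == pvMx r) = false := by
            have := hlt; rw [pvCnt_cons, if_pos rfl] at this; simp; omega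
          rw [this, if_pos rfl]
          simp
          have := hlt; rw [pvCnt_cons, if_pos rfl] at this; omega
        · rw [if_neg hah]

-- B computed on the valid sublist
theorem pv_B_char (parsed_answers : List (Option String)) :
    majority_vote_parsed_py_alt parsed_answers
      = (parsed_answers.filterMap (fun a => a)).find?
          (fun a => pvCnt (parsed_answers.filterMap (fun a => a)) a
                    == pvMx (parsed_answers.filterMap (fun a => a))) := by
  unfold majority_vote_parsed_py_alt
  rw [bStep_filterMap]
  have hrev : parsed_answers.reverse.filterMap (fun a => a)
      = ((parsed_answers.filterMap (fun a => a)).reverse) := by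
    simp
  rw [hrev]
  exact (bInv (parsed_answers.filterMap (fun a => a))).2.2

theorem pv_main (parsed_answers : List (Option String)) :
    majority_vote_parsed_py parsed_answers = majority_vote_parsed_py_alt parsed_answers := by
  rw [pv_B_char]
  simp only [majority_vote_parsed_py]
  generalize (parsed_answers.filterMap (fun a => a)) = valid
  by_cases hv : valid = []
  · rw [if_pos hv, hv]; rfl
  · rw [if_neg hv]
    have hx : ∃ x, x ∈ valid := by
      cases valid with
      | nil => exact absurd rfl hv
      | cons x tl => exact ⟨x, by simp⟩
    obtain ⟨x, hxmem⟩ := hx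
    have hxs : x ∈ PySem.Set.ofList valid := (PySem.Set.mem_ofList valid x).mpr hxmem
    have hvals : PySem.Dict.values (PySem.Dict.counter valid)
        = (PySem.Set.ofList valid).map (fun k => ((valid.count k : Int))) := by
      simp [PySem.Dict.values, PySem.Dict.items_counter, Function.comp]
    have hvne : (PySem.Dict.values (PySem.Dict.counter valid)) ≠ [] := by
      rw [hvals]
      simp only [ne_eq, List.map_eq_nil_iff]
      intro hnil
      rw [hnil] at hxs
      simp at hxs
    obtain ⟨m, hm⟩ : ∃ m, (PySem.Dict.values (PySem.Dict.counter valid)).max? = some m := by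
      cases hmm : (PySem.Dict.values (PySem.Dict.counter valid)).max? with
      | none => exact absurd (List.max?_eq_none_iff.mp hmm) hvne
      | some m => exact ⟨m, rfl⟩
    obtain ⟨hmmem, hmub⟩ := List.max?_eq_some_iff.mp hm
    rw [hm]
    -- m is exactly pvMx valid
    have hmx : m = pvMx valid := by
      apply le_antisymm
      · rw [hvals] at hmmem
        rcases List.mem_map.mp hmmem with ⟨k, hk, rfl⟩
        exact le_pvMx valid k ((PySem.Set.mem_ofList valid k).mp hk)
      · apply pvMx_le
        · rw [hvals] at hmmem
          rcases List.mem_map.mp hmmem with ⟨k, _, rfl⟩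
          positivity
        · intro a ha
          apply hmub
          rw [hvals]
          exact List.mem_map_of_mem ((PySem.Set.mem_ofList valid a).mpr ha)
    apply find?_congr_mem
    intro a _
    rw [PySem.Dict.getD_counter, hmx]
    rfl

-- ===== VERDICT =====
theorem majority_vote_parsed_py_spec : Claim_equal_majority_vote_parsed_py := by
  intro parsed_answers _
  unfold Spec_majority_vote_parsed_py
  exact pv_main parsed_answers
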